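-- pv_equiv track=rewrite | github.com/mohd-giusepper/MOHD---PDF-catalogue-to-XLSX | src/pdf2xlsx/core/normalize.py | strip_section_line
-- ===== SOURCE A (Python) =====
-- from typing import List
--
-- def strip_section_line(lines: List[str], section: str) -> List[str]:
--     stripped = []
--     removed = False
--     for line in lines:
--         if not removed and line.strip() == section:
--             removed = True
--             continue
--         stripped.append(line)
--     return stripped
-- ===== SOURCE B (Python) =====
-- from typing import List
--
-- def strip_section_line(lines: List[str], section: str) -> List[str]:
--     i = next((j for j, line in enumerate(lines) if line.strip() == section), None)
--     if i is None:
--         return list(lines)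
--     return lines[:i] + lines[i + 1:]
-- ===== Notes on version B (the rewrite author's own statement) =====
-- stated objective: idiomatic
-- what changed: Replaces the flag-controlled append loop by locating the index of the first matching line and rebuilding the result with two slices.
import Mathlib
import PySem

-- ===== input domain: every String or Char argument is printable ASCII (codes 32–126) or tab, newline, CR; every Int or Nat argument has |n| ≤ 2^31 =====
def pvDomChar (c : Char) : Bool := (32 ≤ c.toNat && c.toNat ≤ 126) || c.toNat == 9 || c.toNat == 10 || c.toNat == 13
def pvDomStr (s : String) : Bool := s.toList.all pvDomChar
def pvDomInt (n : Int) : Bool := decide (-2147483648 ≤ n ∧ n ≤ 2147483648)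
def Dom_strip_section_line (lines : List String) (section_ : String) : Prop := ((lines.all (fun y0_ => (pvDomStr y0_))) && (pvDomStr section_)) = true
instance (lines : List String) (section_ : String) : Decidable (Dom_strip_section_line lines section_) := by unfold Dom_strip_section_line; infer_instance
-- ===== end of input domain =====

-- B locates the first line whose strip equals section_ and rebuilds the list with two slices,
-- instead of A's flag-controlled append loop (same cost; idiomatic decomposition).


-- ===== PORT A =====
-- the for-loop with the `removed` flag, as structural recursion over the remaining lines
def stripLoopA (section_ : String) : List String → Bool → List String
  | [], _ => []
  | l :: ls, removed =>
    if !removed && (PySem.Str.strip l == section_) then stripLoopA section_ ls true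
    else l :: stripLoopA section_ ls removed

def strip_section_line (lines : List String) (section_ : String) : List String :=
  stripLoopA section_ lines false

-- ===== PORT B =====
-- next((j for j, line in enumerate(lines) if line.strip() == section), None)
def findMatchB (section_ : String) : List String → Nat → Option Nat
  | [], _ => none
  | l :: ls, j =>
    if PySem.Str.strip l == section_ then some j else findMatchB section_ ls (j + 1)

def strip_section_line_alt (lines : List String) (section_ : String) : List String :=
  match findMatchB section_ lines 0 with
  | none => lines
  | some i =>
    PySem.List.slice lines none (some (i : Int)) ++
      PySem.List.slice lines (some ((i : Int) + 1)) none

-- ===== PRECONDITION & SPEC =====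
def Spec_strip_section_line (lines : List String) (section_ : String) (out : List String) : Prop := out = strip_section_line_alt lines section_
instance (lines : List String) (section_ : String) (out : List String) : Decidable (Spec_strip_section_line lines section_ out) := by unfold Spec_strip_section_line; infer_instance

-- ===== CLAIM (what is proved, stated in full; the proofs are below) =====
def Claim_equal_strip_section_line : Prop := ∀ (lines : List String) (section_ : String), Dom_strip_section_line lines section_ → Spec_strip_section_line lines section_ (strip_section_line lines section_)

-- ===== LEMMAS AND PROOFS =====
theorem stripLoopA_true (section_ : String) (ls : List String) :
    stripLoopA section_ ls true = ls := by
  induction ls with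
  | nil => rfl
  | cons l ls ih => simp [stripLoopA, ih]

theorem findMatchB_shift (section_ : String) (ls : List String) (j : Nat) :
    findMatchB section_ ls j = (findMatchB section_ ls 0).map (· + j) := by
  induction ls generalizing j with
  | nil => rfl
  | cons l ls ih =>
    simp only [findMatchB]
    split
    · simp
    · rw [ih (j + 1), ih 1, Option.map_map]
      cases findMatchB section_ ls 0 <;> simp <;> omega

theorem alt_unfold (lines : List String) (section_ : String) :
    strip_section_line_alt lines section_ =
      match findMatchB section_ lines 0 with
      | none => lines
      | some i => lines.take i ++ lines.drop (i + 1) := by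
  unfold strip_section_line_alt
  cases h : findMatchB section_ lines 0 with
  | none => rfl
  | some i =>
    have h1 : ((i : Int) + 1) = ((i + 1 : Nat) : Int) := by push_cast; ring
    show PySem.List.slice lines none (some (i : Int)) ++
        PySem.List.slice lines (some ((i : Int) + 1)) none =
      lines.take i ++ lines.drop (i + 1)
    rw [PySem.List.slice_to_natCast, h1, PySem.List.slice_from_natCast]

theorem strip_section_line_spec : Claim_equal_strip_section_line := by
  unfold Claim_equal_strip_section_line
  intro lines section_ hdom
  clear hdom
  unfold Spec_strip_section_line strip_section_line
  induction lines with
  | nil => rfl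
  | cons l ls ih =>
    rw [alt_unfold]
    simp only [stripLoopA, findMatchB]
    by_cases hm : PySem.Str.strip l == section_
    · simp [hm, stripLoopA_true]
    · rw [if_neg (by simp [hm]), if_neg (by simpa using hm)]
      rw [findMatchB_shift section_ ls 1, ih, alt_unfold]
      cases hf : findMatchB section_ ls 0 <;> simp
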